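-- pv_equiv track=rewrite | github.com/bentomkinson2000/CISC-455-Assignment-1---Genetic-Algorithm-Implementation-of-8-Queen-s-Problem | survivor_selection.py | replacement
-- ===== SOURCE A (Python) =====
-- def replacement(current_pop, current_fitness, offspring, offspring_fitness):
--     """replacement selection"""
--
--     # Combine the current population and offspring
--     population = current_pop + offspring
--     fitness = current_fitness + offspring_fitness
--
--     # Rank the population based on their fitness values
--     population_fitness = list(zip(population, fitness))
--     population_fitness.sort(key=lambda x: x[1], reverse=True)
--
--     #Seperate the fitness and population into seperate list
--     population = [individual for individual, fit in population_fitness]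
--     fitness = [fit for individual, fit in population_fitness]
--
--     # Replace the worst lamda current generation individuals with the lamda offspring
--     new_population = population[:len(current_pop)]
--     new_fitness = fitness[:len(current_pop)]
--
--     return new_population, new_fitness
-- ===== SOURCE B (Python) =====
-- def replacement(current_pop, current_fitness, offspring, offspring_fitness):
--     """Single-pass top-k selection: keep a bounded fitness-descending buffer
--     instead of fully sorting the combined population."""
--     k = len(current_pop)
--     top = []  # at most k (individual, fitness) pairs, fitness-descending, stable
--     for pair in zip(current_pop + offspring, current_fitness + offspring_fitness):
--         i = 0
--         while i < len(top) and top[i][1] >= pair[1]: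
--             i += 1
--         top.insert(i, pair)
--         del top[k:]
--     return [ind for ind, fit in top], [fit for ind, fit in top]
-- ===== Notes on version B (the rewrite author's own statement) =====
-- stated objective: alternative
-- what changed: Replaced the full sort-then-slice of the combined population by a single pass that maintains a bounded fitness-descending top-k buffer (online partial selection with the same stable tie order).
import Mathlib
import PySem

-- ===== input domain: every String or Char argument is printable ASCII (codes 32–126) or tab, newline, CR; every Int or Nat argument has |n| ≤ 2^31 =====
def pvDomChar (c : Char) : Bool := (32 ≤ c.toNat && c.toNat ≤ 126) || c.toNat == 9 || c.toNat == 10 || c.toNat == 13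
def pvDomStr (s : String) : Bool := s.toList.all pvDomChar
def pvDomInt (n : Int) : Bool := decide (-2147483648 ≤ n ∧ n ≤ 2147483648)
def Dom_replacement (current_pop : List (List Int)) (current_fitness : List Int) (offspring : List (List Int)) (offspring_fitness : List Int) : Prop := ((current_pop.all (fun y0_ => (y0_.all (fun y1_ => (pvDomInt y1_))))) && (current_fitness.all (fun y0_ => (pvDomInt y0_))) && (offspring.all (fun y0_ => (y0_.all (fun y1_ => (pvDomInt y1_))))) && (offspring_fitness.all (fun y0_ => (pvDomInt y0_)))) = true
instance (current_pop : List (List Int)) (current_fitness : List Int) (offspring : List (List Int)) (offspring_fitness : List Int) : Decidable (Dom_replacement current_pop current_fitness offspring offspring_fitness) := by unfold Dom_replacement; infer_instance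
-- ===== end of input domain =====

-- B replaces A's full sort-then-slice by a single pass with a bounded fitness-descending
-- top-k buffer (same stable tie order); alternative algorithm, return value identical.

-- ===== PORT A =====
def replacement (current_pop : List (List Int)) (current_fitness : List Int) (offspring : List (List Int)) (offspring_fitness : List Int) : List (List Int) × List Int :=
  let population := current_pop ++ offspring
  let fitness := current_fitness ++ offspring_fitness
  let population_fitness := PySem.List.sorted (population.zip fitness) (fun x => x.2) true
  let population2 := population_fitness.map (fun x => x.1)
  let fitness2 := population_fitness.map (fun x => x.2)
  let new_population := population2.take current_pop.length
  let new_fitness := fitness2.take current_pop.length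
  (new_population, new_fitness)

-- ===== PORT B =====
-- B's inner while/insert: insert pair after every buffered entry with fitness ≥ pair's
def altInsert (pair : List Int × Int) : List (List Int × Int) → List (List Int × Int)
  | [] => [pair]
  | y :: ys => if y.2 ≥ pair.2 then y :: altInsert pair ys else pair :: y :: ys

def replacement_alt (current_pop : List (List Int)) (current_fitness : List Int) (offspring : List (List Int)) (offspring_fitness : List Int) : List (List Int) × List Int :=
  let k := current_pop.length
  let top := ((current_pop ++ offspring).zip (current_fitness ++ offspring_fitness)).foldl
    (fun top pair => (altInsert pair top).take k) []   -- del top[k:]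
  (top.map (fun x => x.1), top.map (fun x => x.2))

-- ===== PRECONDITION & SPEC =====
def Spec_replacement (current_pop : List (List Int)) (current_fitness : List Int) (offspring : List (List Int)) (offspring_fitness : List Int) (out : List (List Int) × List Int) : Prop := out = replacement_alt current_pop current_fitness offspring offspring_fitness
instance (current_pop : List (List Int)) (current_fitness : List Int) (offspring : List (List Int)) (offspring_fitness : List Int) (out : List (List Int) × List Int) : Decidable (Spec_replacement current_pop current_fitness offspring offspring_fitness out) := by unfold Spec_replacement; infer_instance

-- ===== CLAIM (what is proved, stated in full; the proofs are below) =====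
def Claim_equal_replacement : Prop := ∀ (current_pop : List (List Int)) (current_fitness : List Int) (offspring : List (List Int)) (offspring_fitness : List Int), Dom_replacement current_pop current_fitness offspring offspring_fitness → Spec_replacement current_pop current_fitness offspring offspring_fitness (replacement current_pop current_fitness offspring offspring_fitness)

-- ===== LEMMAS AND PROOFS =====

-- B's insertion step is insertBy with the reverse-stable "before" test
theorem altInsert_eq_insertBy (pair : List Int × Int) (l : List (List Int × Int)) :
    altInsert pair l = PySem.List.insertBy (fun a b => decide (b.2 < a.2)) pair l := by
  induction l with
  | nil => rfl
  | cons y ys ih =>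
      simp only [altInsert, PySem.List.insertBy]
      by_cases h : y.2 ≥ pair.2
      · rw [if_pos h, if_neg (by simp only [decide_eq_true_eq]; omega), ih]
      · rw [if_neg h, if_pos (by simp only [decide_eq_true_eq]; omega)]

-- truncating the buffer before inserting does not change the first k results
theorem take_insertBy_take {α : Type} (p : α → α → Bool) (x : α) (l : List α) (k : Nat) :
    (PySem.List.insertBy p x (l.take k)).take k = (PySem.List.insertBy p x l).take k := by
  induction l generalizing k with
  | nil => simp
  | cons y ys ih =>
      cases k with
      | zero => simp
      | succ n =>
          simp only [List.take_succ_cons, PySem.List.insertBy]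
          by_cases h : p x y = true
          · rw [if_pos h, if_pos h]
            simp only [List.take_succ_cons, List.cons.injEq, true_and]
            cases n with
            | zero => simp
            | succ m => simp [List.take_take]
          · rw [if_neg h, if_neg h]
            simp only [List.take_succ_cons, List.cons.injEq, true_and]
            exact ih n

-- the truncated fold computes the first k elements of the untruncated fold
theorem foldl_take_insertBy {α : Type} (p : α → α → Bool) (k : Nat) (xs : List α) :
    ∀ acc : List α,
      xs.foldl (fun a y => (PySem.List.insertBy p y a).take k) (acc.take k)
        = (xs.foldl (fun a y => PySem.List.insertBy p y a) acc).take k := by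
  induction xs with
  | nil => intro acc; simp
  | cons x xs ih =>
      intro acc
      simp only [List.foldl_cons]
      rw [take_insertBy_take, ih]

theorem foldl_take_insertBy_nil {α : Type} (p : α → α → Bool) (k : Nat) (xs : List α) :
    xs.foldl (fun a y => (PySem.List.insertBy p y a).take k) []
      = (xs.foldl (fun a y => PySem.List.insertBy p y a) []).take k := by
  simpa using foldl_take_insertBy p k xs []

theorem replacement_eq (current_pop : List (List Int)) (current_fitness : List Int) (offspring : List (List Int)) (offspring_fitness : List Int) :
    replacement current_pop current_fitness offspring offspring_fitness
      = replacement_alt current_pop current_fitness offspring offspring_fitness := by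
  unfold replacement replacement_alt
  simp only [altInsert_eq_insertBy]
  rw [foldl_take_insertBy_nil, ← PySem.List.sorted_rev_eq_foldl_insertBy]
  simp [List.map_take]

-- ===== VERDICT (by name: the statement is the Claim_ definition above) =====
theorem replacement_spec : Claim_equal_replacement := by
  intro cp cf os ofit _
  unfold Spec_replacement
  exact replacement_eq cp cf os ofit
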